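-- pv_equiv track=rewrite | github.com/ZhuchkaTriplesix/Euler_project | 36.py | find_palindromic_numbers
-- ===== SOURCE A (Python) =====
-- def is_palindrome(s):
--     return s == s[::-1]
--
-- def find_palindromic_numbers(limit):
--     palindromic_numbers = []
--
--     for num in range(1, limit):
--         decimal_str = str(num)
--         binary_str = bin(num)[2:]
--
--         if is_palindrome(decimal_str) and is_palindrome(binary_str):
--             palindromic_numbers.append(num)
--
--     return palindromic_numbers
-- ===== SOURCE B (Python) =====
-- def _reverse_in_base(n, base):
--     r = 0
--     while n > 0:
--         n, d = divmod(n, base)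
--         r = r * base + d
--     return r
--
--
-- def find_palindromic_numbers(limit):
--     # A binary palindrome > 0 starts with bit 1, hence ends with bit 1: it is odd.
--     # So only odd numbers need checking; palindromes are detected by arithmetic
--     # digit reversal instead of building and reversing strings.
--     return [n for n in range(1, limit, 2)
--             if _reverse_in_base(n, 10) == n and _reverse_in_base(n, 2) == n]
-- ===== Notes on version B (the rewrite author's own statement) =====
-- stated objective: alternative
-- what changed: B iterates only odd numbers (a binary palindrome above zero is odd, so even numbers never qualify) and tests palindromicity by arithmetic digit reversal in the decimal and binary bases instead of building, slicing and reversing strings.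
import Mathlib
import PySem

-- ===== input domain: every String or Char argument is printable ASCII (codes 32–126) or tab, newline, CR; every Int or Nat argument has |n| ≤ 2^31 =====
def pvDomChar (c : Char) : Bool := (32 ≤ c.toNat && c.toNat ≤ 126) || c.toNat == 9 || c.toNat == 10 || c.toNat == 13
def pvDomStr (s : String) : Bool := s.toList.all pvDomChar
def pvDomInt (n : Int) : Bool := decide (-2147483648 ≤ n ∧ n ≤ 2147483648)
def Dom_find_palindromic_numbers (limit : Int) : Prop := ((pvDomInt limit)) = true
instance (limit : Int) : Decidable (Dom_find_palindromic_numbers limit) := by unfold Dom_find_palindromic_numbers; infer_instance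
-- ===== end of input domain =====

-- B replaces A's string-based palindrome tests on every number below limit by arithmetic
-- digit reversal and iterates only over the odd numbers (a binary palindrome > 0 is odd);
-- objective: alternative (a structurally different, string-free computation of the same list).

-- ===== PORT A =====
-- is_palindrome(s): s == s[::-1]; slice? with step -1 never fails, so getD's default is never used
def is_palindrome (s : String) : Bool :=
  s == ((PySem.Str.slice? s none none (-1)).getD s)

def find_palindromic_numbers (limit : Int) : List Int :=
  (PySem.List.pyRange 1 limit 1).foldl (fun palindromic_numbers num =>
    let decimal_str := PySem.Int.toStr num
    let binary_str := PySem.Str.slice (PySem.Int.pyBin num) (some 2) none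
    if is_palindrome decimal_str && is_palindrome binary_str then
      palindromic_numbers ++ [num]
    else palindromic_numbers) []

-- ===== PORT B =====
-- _reverse_in_base(n, base): the while-loop of Source B; the `2 ≤ base` conjunct only totalises
-- the recursion (Source B calls it with base 10 and 2 only; Python would not terminate for base ≤ 1)
def pvRevGo (base : Int) (n : Int) (r : Int) : Int :=
  if h : 0 < n ∧ 2 ≤ base then
    pvRevGo base (PySem.Int.floordiv n base) (r * base + PySem.Int.mod n base)
  else r
termination_by n.toNat
decreasing_by
  rw [PySem.Int.floordiv_eq_ediv_of_pos (by omega)]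
  have hq : 0 ≤ n / base := Int.ediv_nonneg (by omega) (by omega)
  have hm : n / base * base ≤ n := Int.ediv_mul_le n (by omega)
  have : n / base < n := by nlinarith [h.1, h.2]
  omega

def reverse_in_base (n : Int) (base : Int) : Int := pvRevGo base n 0

def find_palindromic_numbers_alt (limit : Int) : List Int :=
  (PySem.List.pyRange 1 limit 2).filter (fun n =>
    reverse_in_base n 10 == n && reverse_in_base n 2 == n)

-- ===== PRECONDITION & SPEC =====
def Spec_find_palindromic_numbers (limit : Int) (out : List Int) : Prop := out = find_palindromic_numbers_alt limit
instance (limit : Int) (out : List Int) : Decidable (Spec_find_palindromic_numbers limit out) := by unfold Spec_find_palindromic_numbers; infer_instance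

-- ===== CLAIM (what is proved, stated in full; the proofs are below) =====
def Claim_equal_find_palindromic_numbers : Prop := ∀ (limit : Int), Dom_find_palindromic_numbers limit → Spec_find_palindromic_numbers limit (find_palindromic_numbers limit)

-- ===== LEMMAS AND PROOFS =====

-- Nat.toDigits is the digit-character list of `Nat.digits`, most significant first
lemma toDigitsCore_eq (b : Nat) (hb : 2 ≤ b) (f : Nat) :
    ∀ (n : Nat) (acc : List Char), 0 < n → n < f →
      Nat.toDigitsCore b f n acc = ((Nat.digits b n).map Nat.digitChar).reverse ++ acc := by
  induction f with
  | zero => intro n acc h1 h2; omega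
  | succ f ih =>
    intro n acc h1 h2
    rw [Nat.toDigitsCore]
    rw [Nat.digits_def' (by omega : 1 < b) h1]
    by_cases hdiv : n / b = 0
    · simp [hdiv, Nat.digits_zero]
    · have hlt : n / b < f := by
        have : n / b < n := Nat.div_lt_self h1 (by omega)
        omega
      simp only [hdiv, if_false]
      rw [ih (n / b) _ (Nat.pos_of_ne_zero hdiv) hlt]
      simp

lemma toDigits_eq (b : Nat) (hb : 2 ≤ b) (n : Nat) (hn : 0 < n) :
    Nat.toDigits b n = ((Nat.digits b n).map Nat.digitChar).reverse := by
  unfold Nat.toDigits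
  rw [toDigitsCore_eq b hb (n + 1) n [] hn (by omega)]
  simp

-- is_palindrome is list-reversal equality on the code points
lemma is_palindrome_eq (s : String) :
    is_palindrome s = (s.toList.reverse == s.toList) := by
  unfold is_palindrome
  rw [PySem.Str.slice?_none_none_neg_one]
  simp only [Option.getD_some]
  rw [Bool.eq_iff_iff]
  simp only [beq_iff_eq, String.ext_iff, String.toList_ofList]
  exact eq_comm

lemma digitChar_inj : ∀ x < 10, ∀ y < 10, Nat.digitChar x = Nat.digitChar y → x = y := by decide

lemma map_digitChar_inj : ∀ (xs ys : List Nat), (∀ x ∈ xs, x < 10) → (∀ y ∈ ys, y < 10) →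
    xs.map Nat.digitChar = ys.map Nat.digitChar → xs = ys := by
  intro xs
  induction xs with
  | nil => intro ys _ _ h; cases ys <;> simp_all
  | cons x xs ih =>
    intro ys hx hy h
    cases ys with
    | nil => simp_all
    | cons y ys =>
      simp only [List.map_cons, List.cons.injEq] at h
      have hxy : x = y := digitChar_inj x (hx x (by simp)) y (hy y (by simp)) h.1
      rw [hxy, ih ys (fun a ha => hx a (by simp [ha])) (fun a ha => hy a (by simp [ha])) h.2]

-- the reversal loop computes the value of the reversed digit list
lemma pvRevGo_eq (b : Nat) (hb : 2 ≤ b) : ∀ (m : Nat) (r : Int),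
    pvRevGo (b : Int) (m : Int) r =
      r * (b : Int) ^ (Nat.digits b m).length + (Nat.ofDigits b (Nat.digits b m).reverse : Nat) := by
  intro m
  induction m using Nat.strong_induction_on with
  | _ m ih =>
    intro r
    rw [pvRevGo]
    by_cases hm : 0 < m
    · rw [dif_pos ⟨by exact_mod_cast hm, by exact_mod_cast hb⟩]
      rw [PySem.Int.floordiv_eq_ediv_of_pos (by exact_mod_cast (by omega : 0 < b)),
          PySem.Int.mod_eq_emod_of_pos (by exact_mod_cast (by omega : 0 < b))]
      rw [show (m : Int) / (b : Int) = ((m / b : Nat) : Int) from (Int.natCast_div m b).symm,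
          show (m : Int) % (b : Int) = ((m % b : Nat) : Int) from (Int.natCast_mod m b).symm]
      rw [ih (m / b) (Nat.div_lt_self hm (by omega)) _]
      rw [Nat.digits_def' (by omega : 1 < b) hm]
      simp only [List.reverse_cons, List.length_cons]
      rw [Nat.ofDigits_append]
      simp only [Nat.ofDigits_singleton]
      push_cast
      simp only [List.length_reverse]
      ring
    · rw [dif_neg (by simp; omega)]
      have : m = 0 := by omega
      subst this
      simp [Nat.digits_zero, Nat.ofDigits_nil]

-- numeric reversal fixes m iff the digit list is a palindrome
lemma rev_eq_self_iff (b : Nat) (hb : 2 ≤ b) (m : Nat) (hm : 0 < m) :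
    (Nat.ofDigits b (Nat.digits b m).reverse = m) ↔ (Nat.digits b m).reverse = Nat.digits b m := by
  constructor
  · intro h
    have hne : Nat.digits b m ≠ [] := Nat.digits_ne_nil_iff_ne_zero.mpr (by omega)
    obtain ⟨d, t, hdt⟩ := List.exists_cons_of_ne_nil hne
    by_cases hd : d = 0
    · exfalso
      have hlt : Nat.ofDigits b (Nat.digits b m).reverse < m := by
        rw [hdt, hd, List.reverse_cons, Nat.ofDigits_append]
        simp only [Nat.ofDigits_singleton, Nat.mul_zero, Nat.add_zero, List.length_reverse]
        have h1 : Nat.ofDigits b t.reverse < b ^ t.length := by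
          have := Nat.ofDigits_lt_base_pow_length (l := t.reverse) (by omega : 1 < b)
            (fun x hx => Nat.digits_lt_base (by omega) (by rw [hdt]; exact List.mem_cons_of_mem _ (List.mem_reverse.mp hx)))
          simpa using this
        have h2 : b ^ (Nat.digits b m).length ≤ b * m := Nat.base_pow_length_digits_le b m (by omega) (by omega)
        rw [hdt] at h2
        simp only [List.length_cons, pow_succ] at h2
        calc Nat.ofDigits b t.reverse < b ^ t.length := h1
          _ ≤ m := by
            have hbpos : 0 < b := by omega
            nlinarith [h2]
      omega
    · have := Nat.digits_ofDigits b (by omega : 1 < b) (Nat.digits b m).reverse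
        (fun x hx => Nat.digits_lt_base (by omega) (List.mem_reverse.mp hx))
        (fun hne2 => by simp [hdt, hd])
      rw [h] at this
      exact this.symm
  · intro h
    rw [h, Nat.ofDigits_digits]

-- the string test of A equals the numeric test of B in one base
lemma str_palin_iff (b : Nat) (hb : 2 ≤ b) (hb10 : b ≤ 10) (m : Nat) (hm : 0 < m) :
    ((Nat.toDigits b m).reverse == Nat.toDigits b m) = (pvRevGo (b : Int) (m : Int) 0 == (m : Int)) := by
  rw [Bool.eq_iff_iff]
  simp only [beq_iff_eq]
  rw [toDigits_eq b hb m hm, pvRevGo_eq b hb m 0]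
  rw [List.reverse_reverse]
  simp only [zero_mul, zero_add]
  constructor
  · intro h
    have h2 : (Nat.digits b m).reverse.map Nat.digitChar = (Nat.digits b m).map Nat.digitChar := by
      rw [List.map_reverse]; exact h.symm
    have h3 : (Nat.digits b m).reverse = Nat.digits b m :=
      map_digitChar_inj _ _
        (fun x hx => lt_of_lt_of_le (Nat.digits_lt_base (by omega) (List.mem_reverse.mp hx)) hb10)
        (fun x hx => lt_of_lt_of_le (Nat.digits_lt_base (by omega) hx) hb10) h2
    exact_mod_cast congrArg (Nat.cast (R := Int)) ((rev_eq_self_iff b hb m hm).mpr h3)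
  · intro h
    have h1 : Nat.ofDigits b (Nat.digits b m).reverse = m := by exact_mod_cast h
    have h3 := (rev_eq_self_iff b hb m hm).mp h1
    calc ((Nat.digits b m).map Nat.digitChar) = ((Nat.digits b m).reverse.map Nat.digitChar) := by rw [h3]
      _ = ((Nat.digits b m).map Nat.digitChar).reverse := by rw [List.map_reverse]

-- the two per-element tests agree on every n ≥ 1
lemma pred_eq (n : Int) (hn : 1 ≤ n) :
    (is_palindrome (PySem.Int.toStr n) &&
      is_palindrome (PySem.Str.slice (PySem.Int.pyBin n) (some 2) none)) =
    (reverse_in_base n 10 == n && reverse_in_base n 2 == n) := by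
  lift n to Nat using (by omega) with m
  have hm : 0 < m := by exact_mod_cast hn
  rw [is_palindrome_eq, is_palindrome_eq]
  have hdec : (PySem.Int.toStr (m : Int)).toList = Nat.toDigits 10 m := by
    rw [PySem.Int.toList_toStr]
    simp [PySem.Int.toChars, (by omega : ¬ ((m:Int) < 0))]
  have hbin : (PySem.Str.slice (PySem.Int.pyBin (m : Int)) (some 2) none).toList = Nat.toDigits 2 m := by
    rw [PySem.Str.toList_slice, PySem.Chars.slice_eq_listSlice, PySem.Int.toList_pyBin]
    rw [PySem.List.slice_from _ (by omega : (0:Int) ≤ 2)]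
    rw [show PySem.Int.toBinChars0b (m : Int) = '0' :: 'b' :: Nat.toDigits 2 ((m:Int)).toNat from if_neg (by omega)]
    simp
  rw [hdec, hbin]
  unfold reverse_in_base
  rw [show (10 : Int) = ((10 : Nat) : Int) by norm_num, show (2 : Int) = ((2 : Nat) : Int) by norm_num]
  rw [str_palin_iff 10 (by omega) (by omega) m hm, str_palin_iff 2 (by omega) (by omega) m hm]

-- the test fails on every even n ≥ 1 (a binary palindrome is odd)
lemma pred_even_false (n : Int) (hn : 1 ≤ n) (he : Even n) :
    (reverse_in_base n 10 == n && reverse_in_base n 2 == n) = false := by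
  lift n to Nat using (by omega) with m
  have hm : 0 < m := by exact_mod_cast hn
  have hme : m % 2 = 0 := by
    obtain ⟨k, hk⟩ := he
    omega
  apply Bool.and_eq_false_iff.mpr
  right
  apply beq_eq_false_iff_ne.mpr
  intro hcontra
  unfold reverse_in_base at hcontra
  rw [show (2 : Int) = ((2 : Nat) : Int) by norm_num] at hcontra
  rw [pvRevGo_eq 2 (by omega) m 0] at hcontra
  simp only [zero_mul, zero_add] at hcontra
  have h1 : Nat.ofDigits 2 (Nat.digits 2 m).reverse = m := by exact_mod_cast hcontra
  have h3 := (rev_eq_self_iff 2 (by omega) m hm).mp h1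
  have hne : Nat.digits 2 m ≠ [] := Nat.digits_ne_nil_iff_ne_zero.mpr (by omega)
  have hlast := Nat.getLast_digit_ne_zero 2 (m := m) (by omega)
  have hl? : (Nat.digits 2 m).getLast? = some ((Nat.digits 2 m).getLast hne) :=
    List.getLast?_eq_some_getLast hne
  have hh? : (Nat.digits 2 m).head? = some 0 := by
    rw [Nat.digits_def' (by omega : 1 < 2) hm]
    simp [hme]
  have heq : (Nat.digits 2 m).getLast? = (Nat.digits 2 m).head? := by
    conv_lhs => rw [← h3]
    rw [List.getLast?_reverse]
  rw [hl?, hh?] at heq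
  injection heq with h'
  exact hlast h'

lemma pyRange_two_nil (a b : Int) (h : b ≤ a) : PySem.List.pyRange a b 2 = [] := by
  rw [PySem.List.pyRange_of_pos a b (by norm_num)]
  rw [if_neg (by omega)]
  simp

lemma pyRange_two_cons (a b : Int) (h : a < b) :
    PySem.List.pyRange a b 2 = a :: PySem.List.pyRange (a + 2) b 2 := by
  rw [PySem.List.pyRange_of_pos a b (by norm_num), PySem.List.pyRange_of_pos (a + 2) b (by norm_num)]
  rw [if_pos h]
  have hN : ((b - a + 2 - 1) / 2).toNat = ((if a + 2 < b then ((b - (a + 2) + 2 - 1) / 2).toNat else 0)) + 1 := by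
    split_ifs with h2 <;> omega
  rw [hN, List.range_succ_eq_map]
  simp only [List.map_cons, List.map_map, Nat.cast_zero, mul_zero, add_zero]
  congr 1
  apply List.map_congr_left
  intro k _
  simp [Function.comp, Nat.succ_eq_add_one]
  ring

-- a predicate vanishing on the evens filters the same list from step-1 and step-2 ranges
lemma filter_step_two (P : Int → Bool) (hP : ∀ n, 1 ≤ n → Even n → P n = false) :
    ∀ (a b : Int), 1 ≤ a → Odd a →
      (PySem.List.pyRange a b 1).filter P = (PySem.List.pyRange a b 2).filter P := by
  intro a b ha hodd
  by_cases hab : a < b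
  · by_cases hab2 : a + 1 < b
    · rw [PySem.List.pyRange_one_cons hab, PySem.List.pyRange_one_cons hab2,
          pyRange_two_cons a b hab]
      have heven : P (a + 1) = false := by
        apply hP (a + 1) (by omega)
        obtain ⟨k, hk⟩ := hodd
        exact ⟨k + 1, by omega⟩
      simp only [List.filter_cons, heven, Bool.false_eq_true, if_false,
        show a + 1 + 1 = a + 2 from by ring]
      have := filter_step_two P hP (a + 2) b (by omega)
        (by obtain ⟨k, hk⟩ := hodd; exact ⟨k + 1, by omega⟩)
      rw [this]
    · have hb : b = a + 1 := by omega
      subst hb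
      rw [PySem.List.pyRange_one_cons hab, PySem.List.pyRange_one_eq_nil (by omega),
          pyRange_two_cons a (a + 1) hab, pyRange_two_nil (a + 2) (a + 1) (by omega)]
  · rw [PySem.List.pyRange_one_eq_nil (by omega), pyRange_two_nil a b (by omega)]
termination_by a b => (b - a).toNat
decreasing_by omega

-- ===== VERDICT (by name: the statement is the Claim_ definition above) =====
theorem find_palindromic_numbers_spec : Claim_equal_find_palindromic_numbers := by
  intro limit _
  unfold Spec_find_palindromic_numbers find_palindromic_numbers find_palindromic_numbers_alt
  dsimp only
  have hfold : ∀ (p : Int → Bool) (l : List Int),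
      l.foldl (fun acc x => if p x then acc ++ [x] else acc) [] = l.filter p := by
    intro p l
    simpa using PySem.List.foldl_append_if p id l []
  rw [hfold]
  rw [List.filter_congr (fun x hx => pred_eq x (PySem.List.mem_pyRange_one.mp hx).1)]
  exact filter_step_two _ pred_even_false 1 limit (le_refl 1) (by norm_num)
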